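-- pv_equiv track=rewrite | github.com/namuna309/CodingTestPractice | Programmers/level 2/테이블 해시 함수/Source.py | solution
-- ===== SOURCE A (Python) =====
-- def solution(data, col, row_begin, row_end):
--     answer = 0
--     key_row = [i for i in data[0]]
--
--     s = sorted(data, key = lambda x: [x[col - 1], -x[0]])
--     S = [0] * len(s)
--     for i in range(len(s)):
--         for j in range(len(s[i])):
--             S[i] += s[i][j] % (i + 1)
--
--     for i in range(row_begin - 1, row_end):
--         answer ^= S[i]
--     return answer
-- ===== SOURCE B (Python) =====
-- def solution(data, col, row_begin, row_end):
--     # No sort at all: each row's stable rank (rows with a smaller key, plus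
--     # earlier rows with an equal key) IS its index in the sorted table, so we
--     # XOR in the modular sum of exactly the rows whose rank falls in the window.
--     n = len(data)
--     keys = [(row[col - 1], -row[0]) for row in data]
--     answer = 0
--     for p in range(n):
--         rank = 0
--         for q in range(n):
--             if keys[q] < keys[p] or (keys[q] == keys[p] and q < p):
--                 rank += 1
--         if row_begin - 1 <= rank < row_end:
--             answer ^= sum(v % (rank + 1) for v in data[p])
--     return answer
-- ===== Notes on version B (the rewrite author's own statement) =====
-- stated objective: alternative
-- what changed: B never sorts: it computes each row's stable rank directly by counting rows with a smaller (x[col-1], -x[0]) key (or an equal key and an earlier position), and XORs in the modular sum of exactly the rows whose rank falls in [row_begin-1, row_end), replacing A's sort + full S table + range XOR.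
-- intended difference: On row_begin <= 0 with a nonempty index window, A returns an XOR of S-table entries picked by Python's negative-index wraparound (an accident of list indexing; the problem fixes 1 <= row_begin), while B returns the XOR of the rows whose true sorted rank lies in the window, the intended reading of the window. — e.g. on solution([[3], [5], [7]], 1, -1, -1): A returns 1, B returns 0
import Mathlib
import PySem

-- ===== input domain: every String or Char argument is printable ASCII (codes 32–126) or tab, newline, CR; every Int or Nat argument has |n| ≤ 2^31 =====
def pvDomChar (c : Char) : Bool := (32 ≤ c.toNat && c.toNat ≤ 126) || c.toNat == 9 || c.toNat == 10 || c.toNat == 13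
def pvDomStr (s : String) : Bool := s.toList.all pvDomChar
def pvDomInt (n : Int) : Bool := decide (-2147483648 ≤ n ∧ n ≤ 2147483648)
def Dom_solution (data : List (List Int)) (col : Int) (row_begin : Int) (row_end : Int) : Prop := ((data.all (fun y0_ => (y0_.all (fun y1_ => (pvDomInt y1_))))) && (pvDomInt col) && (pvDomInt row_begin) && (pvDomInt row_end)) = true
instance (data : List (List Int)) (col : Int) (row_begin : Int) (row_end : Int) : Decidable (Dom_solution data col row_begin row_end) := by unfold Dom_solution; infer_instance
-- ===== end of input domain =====

-- B never sorts: a row's stable rank (rows with a smaller (x[col-1], -x[0]) key, plus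
-- earlier rows with an equal key) is its index in A's sorted table, so B counts ranks
-- and XORs the modular sums of exactly the rows whose rank lies in the queried window.

-- ===== PORT A =====
def solution (data : List (List Int)) (col : Int) (row_begin : Int) (row_end : Int) : Int :=
  let answer : Int := 0
  -- key_row = [i for i in data[0]]  (dead value; data[0] raises on [] — excluded by Pre_)
  let _key_row := (PySem.List.pyGetD data 0 []).map (fun i => i)
  let s := PySem.List.sorted2 data (fun x => PySem.List.pyGetD x (col - 1) 0)
                                   (fun x => -(PySem.List.pyGetD x 0 0))
  let S := PySem.List.pyRepeat [(0 : Int)] (PySem.List.len s)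
  let S := (PySem.List.pyRange 0 (PySem.List.len s)).foldl (fun S i =>
      (PySem.List.pyRange 0 (PySem.List.len (PySem.List.pyGetD s i []))).foldl (fun S j =>
        PySem.List.pySetD S i (PySem.List.pyGetD S i 0 +
          PySem.Int.mod (PySem.List.pyGetD (PySem.List.pyGetD s i []) j 0) (i + 1))) S) S
  let answer := (PySem.List.pyRange (row_begin - 1) row_end).foldl (fun acc i =>
      PySem.Int.bxor acc (PySem.List.pyGetD S i 0)) answer
  answer

-- ===== PORT B =====
def solution_alt (data : List (List Int)) (col : Int) (row_begin : Int) (row_end : Int) : Int :=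
  let n : Int := PySem.List.len data
  let keys := data.map (fun row => (PySem.List.pyGetD row (col - 1) 0,
                                    -(PySem.List.pyGetD row 0 0)))
  (PySem.List.pyRange 0 n).foldl (fun answer p =>
    let kp := PySem.List.pyGetD keys p (0, 0)
    let rank : Int := (PySem.List.pyRange 0 n).foldl (fun rank q =>
      let kq := PySem.List.pyGetD keys q (0, 0)
      if kq.1 < kp.1 ∨ (kq.1 = kp.1 ∧ (kq.2 < kp.2 ∨ (kq.2 = kp.2 ∧ q < p)))
      then rank + 1 else rank) 0
    if row_begin - 1 ≤ rank ∧ rank < row_end then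
      PySem.Int.bxor answer
        (((PySem.List.pyGetD data p []).map (fun v => PySem.Int.mod v (rank + 1))).sum)
    else answer) 0

-- ===== PRECONDITION & SPEC =====
-- Pre_ is exactly where A returns: nonempty data, every row with a valid x[0] and
-- x[col-1], and an index window that is empty or stays inside S (negative starts
-- down to -len wrap around in Python and still return).
def Pre_solution (data : List (List Int)) (col : Int) (row_begin : Int) (row_end : Int) : Prop :=
  data ≠ [] ∧ (∀ row ∈ data, row ≠ [] ∧ PySem.Raise.InRange row.length (col - 1)) ∧
  (row_end ≤ row_begin - 1 ∨
    (-(data.length : Int) ≤ row_begin - 1 ∧ row_end ≤ (data.length : Int)))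
instance (data : List (List Int)) (col : Int) (row_begin : Int) (row_end : Int) : Decidable (Pre_solution data col row_begin row_end) := by unfold Pre_solution; infer_instance

def pvWitness_solution : List (List Int) × Int × Int × Int := ([[1, 2], [3, 4]], 1, 1, 2)

-- On row_begin ≤ 0 with a nonempty index window A XORs table entries picked by Python's
-- negative-index wraparound into S (an accident of list indexing; the problem fixes
-- 1 ≤ row_begin), while B returns the XOR of the rows whose true sorted rank lies in the
-- window — the intended reading of the window.
def D_solution (data : List (List Int)) (col : Int) (row_begin : Int) (row_end : Int) : Prop :=
  row_begin ≤ 0 ∧ row_begin - 1 < row_end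
instance (data : List (List Int)) (col : Int) (row_begin : Int) (row_end : Int) : Decidable (D_solution data col row_begin row_end) := by unfold D_solution; infer_instance

def Spec_solution (data : List (List Int)) (col : Int) (row_begin : Int) (row_end : Int) (out : Int) : Prop := ¬ D_solution data col row_begin row_end → out = solution_alt data col row_begin row_end
instance (data : List (List Int)) (col : Int) (row_begin : Int) (row_end : Int) (out : Int) : Decidable (Spec_solution data col row_begin row_end out) := by unfold Spec_solution; infer_instance

def pvDiffWitness_solution : List (List Int) × Int × Int × Int := ([[3], [5], [7]], 1, -1, -1)
def pvDiffWitnessOut_solution : Int × Int := (1, 0)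

-- ===== CLAIM (what is proved, stated in full; the proofs are below) =====
def Claim_unchanged_solution : Prop := ∀ (data : List (List Int)) (col : Int) (row_begin : Int) (row_end : Int), Dom_solution data col row_begin row_end → Pre_solution data col row_begin row_end → Spec_solution data col row_begin row_end (solution data col row_begin row_end)
def Claim_changed_solution : Prop := Dom_solution (pvDiffWitness_solution.1) (pvDiffWitness_solution.2.1) (pvDiffWitness_solution.2.2.1) (pvDiffWitness_solution.2.2.2) ∧ Pre_solution (pvDiffWitness_solution.1) (pvDiffWitness_solution.2.1) (pvDiffWitness_solution.2.2.1) (pvDiffWitness_solution.2.2.2) ∧ D_solution (pvDiffWitness_solution.1) (pvDiffWitness_solution.2.1) (pvDiffWitness_solution.2.2.1) (pvDiffWitness_solution.2.2.2) ∧ solution (pvDiffWitness_solution.1) (pvDiffWitness_solution.2.1) (pvDiffWitness_solution.2.2.1) (pvDiffWitness_solution.2.2.2) = pvDiffWitnessOut_solution.1 ∧ solution_alt (pvDiffWitness_solution.1) (pvDiffWitness_solution.2.1) (pvDiffWitness_solution.2.2.1) (pvDiffWitness_solution.2.2.2) = pvDiffWitnessOut_solution.2 ∧ pvDiffWitnessOut_solution.1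 ≠ pvDiffWitnessOut_solution.2

-- ===== LEMMAS AND PROOFS =====

-- the per-row summand, the sort key, the strict total stable order on original
-- positions, a row's stable rank (= its index in the sorted table), the window test
def pvKey (col : Int) (row : List Int) : Int × Int :=
  (PySem.List.pyGetD row (col - 1) 0, -(PySem.List.pyGetD row 0 0))

def pvLtB (col : Int) (data : List (List Int)) (p q : Nat) : Bool :=
  let a := pvKey col (data.getD p []); let b := pvKey col (data.getD q [])
  decide (a.1 < b.1 ∨ (a.1 = b.1 ∧ (a.2 < b.2 ∨ (a.2 = b.2 ∧ p < q))))

def pvBefore (col : Int) (x y : List Int) : Bool :=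
  decide (PySem.List.pyGetD x (col - 1) 0 < PySem.List.pyGetD y (col - 1) 0) ||
  (!decide (PySem.List.pyGetD y (col - 1) 0 < PySem.List.pyGetD x (col - 1) 0) &&
   decide (-(PySem.List.pyGetD x 0 0) < -(PySem.List.pyGetD y 0 0)))
def pvRank (col : Int) (data : List (List Int)) (p : Nat) : Nat :=
  (List.range data.length).countP (fun q => pvLtB col data q p)

def pvInW (rb re : Int) (k : Nat) : Bool := decide (rb - 1 ≤ (k : Int) ∧ (k : Int) < re)

def pvRowSum (row : List Int) (i : Int) : Int :=
  (row.map (fun v => PySem.Int.mod v (i + 1))).sum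

def pvH (col : Int) (data : List (List Int)) (p : Nat) : Int :=
  pvRowSum (data.getD p []) ((pvRank col data p : Nat) : Int)

-- ---- bxor: normal form and right-commutativity ----
def pvU (a : Int) : Nat := if 0 ≤ a then a.toNat else (-a - 1).toNat
def pvS (a : Int) : Bool := decide (a < 0)
def pvDec (n : Nat) (s : Bool) : Int := if s then -(n : Int) - 1 else (n : Int)

theorem pv_bxor_norm (a b : Int) :
    PySem.Int.bxor a b = pvDec (pvU a ^^^ pvU b) (pvS a != pvS b) := by
  unfold PySem.Int.bxor pvU pvS pvDec
  by_cases ha : 0 ≤ a <;> by_cases hb : 0 ≤ b <;>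
    simp [ha, hb, show (a < 0) = ¬ (0 ≤ a) by simp [not_le], decide_eq_true_eq]

theorem pvU_dec (n : Nat) (s : Bool) : pvU (pvDec n s) = n := by
  cases s <;> simp [pvU, pvDec] <;> omega

theorem pvS_dec (n : Nat) (s : Bool) : pvS (pvDec n s) = s := by
  cases s <;> simp [pvS, pvDec] <;> omega

theorem pv_bxor_right_comm (z x y : Int) :
    PySem.Int.bxor (PySem.Int.bxor z x) y = PySem.Int.bxor (PySem.Int.bxor z y) x := by
  simp only [pv_bxor_norm, pvU_dec, pvS_dec]
  congr 1
  · rw [Nat.xor_assoc, Nat.xor_assoc, Nat.xor_comm (pvU x)]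
  · cases pvS z <;> cases pvS x <;> cases pvS y <;> rfl

-- ---- insertBy as takeWhile/dropWhile, and the stable order's basic facts ----
theorem pv_insertBy_eq {α : Type} (before : α → α → Bool) (x : α) (ys : List α) :
    PySem.List.insertBy before x ys =
      ys.takeWhile (fun y => !before x y) ++ x :: ys.dropWhile (fun y => !before x y) := by
  induction ys with
  | nil => rfl
  | cons y t ih =>
    by_cases h : before x y
    · simp [PySem.List.insertBy, h]
    · simp [PySem.List.insertBy, h, ih]
theorem pv_ltB_irrefl (col : Int) (data : List (List Int)) (p : Nat) :
    pvLtB col data p p = false := by simp [pvLtB]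

theorem pv_ltB_asymm (col : Int) (data : List (List Int)) {p q : Nat}
    (h : pvLtB col data p q = true) : pvLtB col data q p = false := by
  simp only [pvLtB, decide_eq_true_eq, decide_eq_false_iff_not] at *
  omega

-- ---- STABILITY: the sorted table is data rearranged by stable rank ----
theorem pv_sorted2_eq (col : Int) (data : List (List Int)) :
    PySem.List.sorted2 data (fun x => PySem.List.pyGetD x (col - 1) 0)
        (fun x => -(PySem.List.pyGetD x 0 0)) false =
      data.foldl (fun acc x => PySem.List.insertBy (pvBefore col) x acc) [] := rfl

theorem pv_dropWhile_head_false {α : Type} (g : α → Bool) :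
    ∀ (σ : List α) (q0 : α) (d' : List α), σ.dropWhile g = q0 :: d' → g q0 = false := by
  intro σ
  induction σ with
  | nil => intro q0 d' h; cases h
  | cons a t ih =>
    intro q0 d' h
    by_cases hga : g a
    · rw [List.dropWhile_cons_of_pos hga] at h
      exact ih q0 d' h
    · rw [List.dropWhile_cons_of_neg hga] at h
      cases h
      exact Bool.eq_false_iff.mpr hga

theorem pv_stab (col : Int) (data : List (List Int)) :
    ∃ σ : List Nat, σ.Perm (List.range data.length) ∧
      PySem.List.sorted2 data (fun x => PySem.List.pyGetD x (col - 1) 0)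
        (fun x => -(PySem.List.pyGetD x 0 0)) false =
        σ.map (fun p => data.getD p []) ∧
      σ.Pairwise (fun p q => pvLtB col data p q = true) := by
  induction data using List.reverseRecOn with
  | nil => exact ⟨[], by simp, rfl, List.Pairwise.nil⟩
  | append_singleton l x ih =>
    obtain ⟨σ, hperm, hsort, hpw⟩ := ih
    set n := l.length with hn
    have hmemlt : ∀ p ∈ σ, p < n := fun p hp => List.mem_range.mp (hperm.mem_iff.mp hp)
    have hgetd : ∀ p < n, (l ++ [x]).getD p [] = l.getD p [] :=
      fun p hp => List.getD_append l [x] [] p hp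
    have hgetn : (l ++ [x]).getD n [] = x := by
      have h0 : n - l.length = 0 := by omega
      rw [List.getD_append_right l [x] [] n (le_refl n), h0]
      rfl
    set f : Nat → List Int := fun p => l.getD p [] with hf
    set g : Nat → Bool := fun p => !pvBefore col x (f p) with hg
    set t := σ.takeWhile g with ht
    set d := σ.dropWhile g with hdd
    have htd : t ++ d = σ := List.takeWhile_append_dropWhile
    have htmem : ∀ p ∈ t, p ∈ σ := fun p hp => (List.takeWhile_sublist g).mem hp
    have hdmem : ∀ p ∈ d, p ∈ σ := fun p hp => (List.dropWhile_sublist g).mem hp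
    -- key comparison transport: pvLtB over l++[x] for indices < n agrees with over l
    have hcongrR : ∀ p < n, ∀ q < n, pvLtB col (l ++ [x]) p q = pvLtB col l p q := by
      intro p hp q hq
      simp only [pvLtB, hgetd p hp, hgetd q hq]
    refine ⟨t ++ n :: d, ?_, ?_, ?_⟩
    · -- permutation
      have hlen1 : (l ++ [x]).length = n + 1 := by simp [hn]
      rw [hlen1, List.range_succ]
      have h1 : (t ++ n :: d).Perm (n :: σ) := by rw [← htd]; exact List.perm_middle
      exact h1.trans ((List.Perm.cons n hperm).trans
        (by simpa using (List.perm_middle (a := n) (l₁ := List.range n)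
          (l₂ := ([] : List Nat))).symm))
    · -- the sorted table
      rw [pv_sorted2_eq, List.foldl_append, List.foldl_cons, List.foldl_nil,
          ← pv_sorted2_eq, hsort, pv_insertBy_eq, List.takeWhile_map, List.dropWhile_map]
      have hcomp : ((fun y => !pvBefore col x y) ∘ f) = g := rfl
      rw [hcomp, List.map_append, List.map_cons]
      congr 1
      · exact (List.map_congr_left (fun p hp => (hgetd p (hmemlt p (htmem p hp))).symm))
      · rw [hgetn]
        congr 1
        exact (List.map_congr_left (fun p hp => (hgetd p (hmemlt p (hdmem p hp))).symm))
    · -- pairwise stable order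
      have hpwtd := htd ▸ hpw
      obtain ⟨hpwt, hpwd, hcross⟩ := List.pairwise_append.mp hpwtd
      have hRn : ∀ p ∈ t, pvLtB col (l ++ [x]) p n = true := by
        intro p hp
        have hpn := hmemlt p (htmem p hp)
        have hgp : g p = true := List.mem_takeWhile_imp hp
        have hgp' : pvBefore col x (f p) = false := by
          simpa [hg, Bool.not_eq_true'] using hgp
        simp [pvBefore] at hgp'
        simp only [pvLtB, pvKey, hgetd p hpn, hgetn, decide_eq_true_eq]
        simp only [hf] at hgp'
        omega
      have hnR : ∀ q ∈ d, pvLtB col (l ++ [x]) n q = true := by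
        intro q hq
        -- the first dropped element fails g; later ones are ≥ it in the stable order
        rcases hd : d with _ | ⟨q0, d'⟩
        · rw [hd] at hq; cases hq
        · have hq0g : g q0 = false := pv_dropWhile_head_false g σ q0 d' (by rw [← hdd, hd])
          have hq0 : pvBefore col x (f q0) = true := by
            simpa [hg, Bool.not_eq_false'] using hq0g
          simp [pvBefore] at hq0
          simp only [hf] at hq0
          have hq0n := hmemlt q0 (hdmem q0 (by rw [hd]; exact List.mem_cons_self))
          have hqn := hmemlt q (hdmem q hq)
          rw [hd] at hq
          rcases List.mem_cons.mp hq with rfl | hq'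
          · simp only [pvLtB, pvKey, hgetd q hqn, hgetn, decide_eq_true_eq]
            omega
          · have hR : pvLtB col l q0 q = true := by
              have := List.pairwise_cons.mp (hd ▸ hpwd)
              exact this.1 q hq'
            simp only [pvLtB, pvKey, decide_eq_true_eq] at hR
            simp only [pvLtB, pvKey, hgetd q hqn, hgetn, decide_eq_true_eq]
            omega
      rw [List.pairwise_append]
      refine ⟨hpwt.imp_of_mem ?_, List.pairwise_cons.mpr ⟨hnR, hpwd.imp_of_mem ?_⟩, ?_⟩
      · intro a b ha hb h
        rw [hcongrR a (hmemlt a (htmem a ha)) b (hmemlt b (htmem b hb))]; exact h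
      · intro a b ha hb h
        rw [hcongrR a (hmemlt a (hdmem a ha)) b (hmemlt b (hdmem b hb))]; exact h
      · intro a ha b hb
        rcases List.mem_cons.mp hb with rfl | hb'
        · exact hRn a ha
        · rw [hcongrR a (hmemlt a (htmem a ha)) b (hmemlt b (hdmem b hb'))]
          exact hcross a ha b hb'

theorem pv_rank_getElem (col : Int) (data : List (List Int)) (σ : List Nat)
    (hp : σ.Perm (List.range data.length))
    (hpw : σ.Pairwise (fun p q => pvLtB col data p q = true))
    (i : Nat) (hi : i < σ.length) : pvRank col data σ[i] = i := by
  unfold pvRank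
  rw [(hp.countP_eq _).symm]
  have hsplit : σ = σ.take i ++ σ.drop i := (List.take_append_drop i σ).symm
  have hdrop : σ.drop i = σ[i] :: σ.drop (i + 1) := List.drop_eq_getElem_cons hi
  have hpwsplit := hsplit ▸ hpw
  obtain ⟨_, hpwd, hcross⟩ := List.pairwise_append.mp hpwsplit
  have hcc : σ.countP (fun q => pvLtB col data q σ[i]) =
      (σ.take i ++ σ.drop i).countP (fun q => pvLtB col data q σ[i]) := by
    rw [List.take_append_drop]
  rw [hcc, List.countP_append, hdrop, List.countP_cons]
  have hmemi : σ[i] ∈ σ.drop i := by rw [hdrop]; exact List.mem_cons_self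
  have htake : (σ.take i).countP (fun q => pvLtB col data q σ[i]) = i := by
    have hall : ∀ q ∈ σ.take i, pvLtB col data q σ[i] = true :=
      fun q hq => hcross q hq σ[i] hmemi
    rw [List.countP_eq_length.mpr hall, List.length_take]
    omega
  have hdropc : (σ.drop (i + 1)).countP (fun q => pvLtB col data q σ[i]) = 0 := by
    rw [List.countP_eq_zero]
    intro q hq
    have := (List.pairwise_cons.mp (hdrop ▸ hpwd)).1 q hq
    simp [pv_ltB_asymm col data this]
  rw [htake, hdropc, pv_ltB_irrefl]
  simp

theorem pv_window_perm (col rb re : Int) (data : List (List Int)) (σ : List Nat)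
    (hp : σ.Perm (List.range data.length))
    (hpw : σ.Pairwise (fun p q => pvLtB col data p q = true)) :
    (((List.range data.length).filter (fun i => pvInW rb re i)).map (fun i => σ.getD i 0)).Perm
      ((List.range data.length).filter (fun p => pvInW rb re (pvRank col data p))) := by
  have hlen : σ.length = data.length := by simpa using hp.length_eq
  have hnd : σ.Nodup := hp.nodup_iff.mpr (List.nodup_range)
  have hndl : (((List.range data.length).filter (fun i => pvInW rb re i)).map
      (fun i => σ.getD i 0)).Nodup := by
    refine List.Nodup.map_on ?_ ((List.nodup_range).filter _)
    intro a ha b hb hab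
    have han : a < σ.length := by
      have := List.mem_range.mp (List.mem_of_mem_filter ha); omega
    have hbn : b < σ.length := by
      have := List.mem_range.mp (List.mem_of_mem_filter hb); omega
    rw [List.getD_eq_getElem σ 0 han, List.getD_eq_getElem σ 0 hbn] at hab
    exact (hnd.getElem_inj_iff).mp hab
  rw [List.perm_ext_iff_of_nodup hndl ((List.nodup_range).filter _)]
  intro p
  simp only [List.mem_map, List.mem_filter, List.mem_range]
  constructor
  · rintro ⟨i, ⟨hin, hw⟩, rfl⟩
    have hilt : i < σ.length := by omega
    rw [List.getD_eq_getElem σ 0 hilt]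
    have hmem : σ[i] ∈ σ := List.getElem_mem hilt
    have : σ[i] < data.length := List.mem_range.mp (hp.mem_iff.mp hmem)
    refine ⟨this, ?_⟩
    rw [pv_rank_getElem col data σ hp hpw i hilt]
    exact hw
  · rintro ⟨hpn, hw⟩
    have hmem : p ∈ σ := hp.mem_iff.mpr (List.mem_range.mpr hpn)
    obtain ⟨i, hilt, rfl⟩ := List.getElem_of_mem hmem
    refine ⟨i, ⟨by omega, ?_⟩, List.getD_eq_getElem σ 0 hilt⟩
    rwa [pv_rank_getElem col data σ hp hpw i hilt] at hw

-- ---- pyRange over nonnegative bounds as a filtered Nat range ----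
theorem pv_pyRange_pairwise_lt : ∀ (k : Nat) (a b : Int), (b - a).toNat = k →
    (PySem.List.pyRange a b).Pairwise (· < ·) := by
  intro k
  induction k with
  | zero => intro a b h; rw [PySem.List.pyRange_one_eq_nil (by omega)]; exact List.Pairwise.nil
  | succ k ih =>
    intro a b h
    rw [PySem.List.pyRange_one_cons (by omega)]
    exact List.pairwise_cons.mpr
      ⟨fun x hx => by have := PySem.List.mem_pyRange_one.mp hx; omega, ih (a + 1) b (by omega)⟩
theorem pv_pyRange_eq (n : Nat) (a b : Int) (h0 : 0 ≤ a) (hb : b ≤ (n : Int)) :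
    PySem.List.pyRange a b =
      ((List.range n).filter (fun i : Nat => decide (a ≤ (i : Int) ∧ (i : Int) < b))).map
        (fun i : Nat => (i : Int)) := by
  have hpl : (PySem.List.pyRange a b).Pairwise (· < ·) := pv_pyRange_pairwise_lt _ a b rfl
  have hpr : (((List.range n).filter (fun i : Nat => decide (a ≤ (i : Int) ∧ (i : Int) < b))).map
      (fun i : Nat => (i : Int))).Pairwise (· < ·) := by
    refine List.Pairwise.map _ (fun x y h => by exact_mod_cast h)
      (((List.pairwise_lt_range (n := n)).sublist List.filter_sublist))
  have hnd : (((List.range n).filter (fun i : Nat => decide (a ≤ (i : Int) ∧ (i : Int) < b))).map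
      (fun i : Nat => (i : Int))).Nodup := (hpr.imp (fun h => by omega)).nodup
  have hperm : (PySem.List.pyRange a b).Perm
      (((List.range n).filter (fun i : Nat => decide (a ≤ (i : Int) ∧ (i : Int) < b))).map
        (fun i : Nat => (i : Int))) := by
    rw [List.perm_ext_iff_of_nodup (PySem.List.nodup_pyRange_one a b) hnd]
    intro x
    rw [PySem.List.mem_pyRange_one]
    simp only [List.mem_map, List.mem_filter, List.mem_range, decide_eq_true_eq]
    constructor
    · rintro ⟨hax, hxb⟩
      exact ⟨x.toNat, ⟨by omega, by omega, by omega⟩, by omega⟩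
    · rintro ⟨i, ⟨hin, hai, hib⟩, rfl⟩
      exact ⟨hai, hib⟩
  exact List.eq_of_perm_of_sorted (fun a b _ _ h1 h2 => le_antisymm h1 h2)
    (hpl.imp le_of_lt) (hpr.imp le_of_lt) hperm

-- ---- A-side: pySetD/pyGetD facts and the two loops of A ----
theorem pv_setD_eq_set (S : List Int) (i v : Int) (h0 : 0 ≤ i) (h1 : i < (S.length : Int)) :
    PySem.List.pySetD S i v = S.set i.toNat v := by
  simp only [PySem.List.pySetD, PySem.List.pySet?, PySem.List.pyIdx?]
  rw [if_pos h0, if_pos h1]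
  rfl

theorem pv_setD_oob (S : List Int) (i v : Int) (h : (S.length : Int) ≤ i) :
    PySem.List.pySetD S i v = S := by
  simp only [PySem.List.pySetD, PySem.List.pySet?, PySem.List.pyIdx?]
  rw [if_pos (by omega), if_neg (by omega)]
  rfl

theorem pv_getD_setD (S : List Int) (i k v : Int) (h0 : 0 ≤ i) (h1 : i < (S.length : Int))
    (hk : 0 ≤ k) :
    PySem.List.pyGetD (PySem.List.pySetD S i v) k 0 =
      if k = i then v else PySem.List.pyGetD S k 0 := by
  have := PySem.List.pyGetD_pySetD_natCast S i.toNat k.toNat v 0 (by omega)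
  rw [Int.toNat_of_nonneg h0, Int.toNat_of_nonneg hk] at this
  rw [this]
  by_cases h : k = i
  · simp [h]
  · rw [if_neg (by omega), if_neg h]

theorem pv_setD_get_self (S : List Int) (i : Int) (h0 : 0 ≤ i) (h1 : i < (S.length : Int)) :
    PySem.List.pySetD S i (PySem.List.pyGetD S i 0) = S := by
  rw [pv_setD_eq_set S i _ h0 h1, PySem.List.pyGetD_eq_getElem S 0 h0 h1]
  exact List.set_getElem_self (by omega)

theorem pv_setD_setD (S : List Int) (i a b : Int) (h0 : 0 ≤ i) :
    PySem.List.pySetD (PySem.List.pySetD S i a) i b = PySem.List.pySetD S i b := by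
  by_cases h1 : i < (S.length : Int)
  · rw [pv_setD_eq_set S i a h0 h1,
        pv_setD_eq_set _ i b h0 (by rw [List.length_set]; exact h1),
        pv_setD_eq_set S i b h0 h1, List.set_set]
  · rw [pv_setD_oob S i a (by omega)]

-- A's inner loop over a row: repeated S[i] += row[j] % (i+1) is one pySetD of the row sum
theorem pv_inner (row : List Int) (S : List Int) (i : Int) (h0 : 0 ≤ i) :
    row.foldl (fun S v =>
        PySem.List.pySetD S i (PySem.List.pyGetD S i 0 + PySem.Int.mod v (i + 1))) S =
      PySem.List.pySetD S i (PySem.List.pyGetD S i 0 + pvRowSum row i) := by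
  by_cases hlen : i < (S.length : Int)
  · induction row generalizing S with
    | nil =>
      simp only [List.foldl_nil, pvRowSum, List.map_nil, List.sum_nil, add_zero]
      exact (pv_setD_get_self S i h0 hlen).symm
    | cons v t ih =>
      rw [List.foldl_cons]
      rw [ih (PySem.List.pySetD S i (PySem.List.pyGetD S i 0 + PySem.Int.mod v (i + 1)))
          (by rw [PySem.List.length_pySetD]; exact hlen)]
      rw [pv_getD_setD S i i _ h0 hlen h0, if_pos rfl, pv_setD_setD S i _ _ h0]
      congr 1
      simp [pvRowSum]
      ring
  · have hoob : ∀ (v : Int), PySem.List.pySetD S i v = S :=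
      fun v => pv_setD_oob S i v (by omega)
    rw [hoob]
    induction row with
    | nil => simp
    | cons v t ih => rw [List.foldl_cons, hoob, ih]

-- A's outer loop, after pv_inner: a fold of single-index updates; the value at index k
theorem pv_outer (s : List (List Int)) (L : List Int) :
    ∀ (S : List Int), L.Nodup → (∀ i ∈ L, 0 ≤ i) →
    ∀ k, 0 ≤ k → k < (S.length : Int) →
    PySem.List.pyGetD (L.foldl (fun S i =>
        PySem.List.pySetD S i (PySem.List.pyGetD S i 0 + pvRowSum (PySem.List.pyGetD s i []) i)) S) k 0 =
      PySem.List.pyGetD S k 0 + (if k ∈ L then pvRowSum (PySem.List.pyGetD s k []) k else 0) := by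
  induction L with
  | nil => intro S _ _ k _ _; simp
  | cons i t ih =>
    intro S hnd hpos k hk hklen
    rw [List.foldl_cons]
    by_cases hir : i < (S.length : Int)
    · rw [ih _ hnd.of_cons (fun j hj => hpos j (List.mem_cons_of_mem _ hj)) k hk
          (by rw [PySem.List.length_pySetD]; exact hklen)]
      rw [pv_getD_setD S i k _ (hpos i (List.mem_cons_self)) hir hk]
      by_cases hki : k = i
      · subst hki
        have hnot : k ∉ t := (List.nodup_cons.mp hnd).1
        rw [if_pos rfl, if_neg hnot, if_pos (List.mem_cons_self)]
        ring
      · rw [if_neg hki]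
        by_cases hkt : k ∈ t
        · rw [if_pos hkt, if_pos (List.mem_cons_of_mem _ hkt)]
        · rw [if_neg hkt, if_neg (by simp [hki, hkt])]
    · rw [pv_setD_oob S i _ (by omega)]
      rw [ih _ hnd.of_cons (fun j hj => hpos j (List.mem_cons_of_mem _ hj)) k hk hklen]
      have hki : k ≠ i := by omega
      by_cases hkt : k ∈ t
      · rw [if_pos hkt, if_pos (List.mem_cons_of_mem _ hkt)]
      · rw [if_neg hkt, if_neg (by simp [hki, hkt])]

-- A's value in middle form: XOR over the window of the sorted table's row sums
theorem pv_A_mid (data : List (List Int)) (col rb re : Int)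
    (hb : 1 ≤ rb) (he : re ≤ (data.length : Int)) :
    solution data col rb re =
      (PySem.List.pyRange (rb - 1) re).foldl (fun acc i =>
        PySem.Int.bxor acc (pvRowSum (PySem.List.pyGetD
          (PySem.List.sorted2 data (fun x => PySem.List.pyGetD x (col - 1) 0)
            (fun x => -(PySem.List.pyGetD x 0 0)) false) i []) i)) 0 := by
  unfold solution
  simp only [PySem.List.len_eq]
  set s := PySem.List.sorted2 data (fun x => PySem.List.pyGetD x (col - 1) 0)
      (fun x => -(PySem.List.pyGetD x 0 0)) with hs
  have hcongr := PySem.List.foldl_congr_mem (PySem.List.pyRange 0 ((s.length : Int)))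
      (fun S i => (PySem.List.pyRange 0 (((PySem.List.pyGetD s i []).length : Int))).foldl
        (fun S j => PySem.List.pySetD S i (PySem.List.pyGetD S i 0 +
          PySem.Int.mod (PySem.List.pyGetD (PySem.List.pyGetD s i []) j 0) (i + 1))) S)
      (fun S i => PySem.List.pySetD S i
        (PySem.List.pyGetD S i 0 + pvRowSum (PySem.List.pyGetD s i []) i))
      (PySem.List.pyRepeat [(0 : Int)] ((s.length : Int)))
      (by
        intro S i hi
        have h0 : (0:Int) ≤ i := (PySem.List.mem_pyRange_one.mp hi).1
        simp only
        rw [PySem.List.foldl_pyRange_zero_pyGetD' (PySem.List.pyGetD s i []) 0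
            (fun S v => PySem.List.pySetD S i (PySem.List.pyGetD S i 0 +
              PySem.Int.mod v (i + 1))) S]
        exact pv_inner _ S i h0)
  rw [hcongr]
  apply PySem.List.foldl_congr_mem
  intro acc i hi
  have hmem := PySem.List.mem_pyRange_one.mp hi
  have h0i : (0:Int) ≤ i := by omega
  have hlen : s.length = data.length := (PySem.List.sorted2_perm data _ _ false).length_eq
  have hilen : i < (s.length : Int) := by omega
  have hSlen : (PySem.List.pyRepeat [(0:Int)] ((s.length : Int))).length = s.length := by
    rw [PySem.List.pyRepeat_singleton, List.length_replicate]
    omega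
  rw [pv_outer s _ _ (PySem.List.nodup_pyRange_one 0 ((s.length : Int)))
      (fun j hj => (PySem.List.mem_pyRange_one.mp hj).1) i h0i (by rw [hSlen]; exact hilen)]
  rw [if_pos (PySem.List.mem_pyRange_one.mpr ⟨h0i, hilen⟩)]
  have hzero : PySem.List.pyGetD (PySem.List.pyRepeat [(0:Int)] ((s.length : Int))) i 0 = 0 := by
    rw [PySem.List.pyRepeat_singleton,
        PySem.List.pyGetD_eq_getElem _ 0 h0i (by rw [List.length_replicate]; omega)]
    simp
  rw [hzero, zero_add]

-- B's value: XOR of pvH over original positions whose rank lies in the window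
theorem pv_keys_getD (col : Int) (data : List (List Int)) (p : Nat) (hp : p < data.length) :
    PySem.List.pyGetD (data.map (fun row => (PySem.List.pyGetD row (col - 1) 0,
        -(PySem.List.pyGetD row 0 0)))) (p : Int) ((0 : Int), (0 : Int)) =
      pvKey col (data.getD p []) := by
  rw [PySem.List.pyGetD_natCast, List.getD_eq_getElem _ _ (by simpa using hp),
      List.getElem_map, pvKey, List.getD_eq_getElem _ _ hp]

theorem pv_rank_fold (col : Int) (data : List (List Int)) (p : Nat) :
    (List.range data.length).foldl (fun rank (q : Nat) =>
      if (PySem.List.pyGetD (data.map (fun row => (PySem.List.pyGetD row (col - 1) 0,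
            -(PySem.List.pyGetD row 0 0)))) (q : Int) ((0 : Int), (0 : Int))).1 <
            (pvKey col (data.getD p [])).1 ∨
          ((PySem.List.pyGetD (data.map (fun row => (PySem.List.pyGetD row (col - 1) 0,
            -(PySem.List.pyGetD row 0 0)))) (q : Int) ((0 : Int), (0 : Int))).1 =
            (pvKey col (data.getD p [])).1 ∧
           ((PySem.List.pyGetD (data.map (fun row => (PySem.List.pyGetD row (col - 1) 0,
            -(PySem.List.pyGetD row 0 0)))) (q : Int) ((0 : Int), (0 : Int))).2 <
            (pvKey col (data.getD p [])).2 ∨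
            ((PySem.List.pyGetD (data.map (fun row => (PySem.List.pyGetD row (col - 1) 0,
            -(PySem.List.pyGetD row 0 0)))) (q : Int) ((0 : Int), (0 : Int))).2 =
            (pvKey col (data.getD p [])).2 ∧ (q : Int) < (p : Int))))
      then rank + 1 else rank) (0 : Int) = ((pvRank col data p : Nat) : Int) := by
  refine (PySem.List.foldl_congr_mem (List.range data.length) _
    (fun rank (q : Nat) => if pvLtB col data q p = true then rank + (1 : Int) else rank) 0
    ?_).trans ?_
  · intro rank q hq
    have hqn := List.mem_range.mp hq
    simp only [pv_keys_getD col data q hqn, Nat.cast_lt, pvLtB, decide_eq_true_eq]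
  · rw [PySem.List.foldl_count_if]
    simp [pvRank]

theorem pv_B_eq (data : List (List Int)) (col rb re : Int) :
    solution_alt data col rb re =
      ((List.range data.length).filter (fun p => pvInW rb re (pvRank col data p))).foldl
        (fun acc p => PySem.Int.bxor acc (pvH col data p)) 0 := by
  unfold solution_alt
  simp only [PySem.List.len_eq, PySem.List.pyRange_zero_natCast, List.foldl_map]
  rw [List.foldl_filter]
  apply PySem.List.foldl_congr_mem
  intro acc p hp
  have hpn : p < data.length := List.mem_range.mp hp
  simp only [pv_keys_getD col data p hpn]
  rw [pv_rank_fold col data p]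
  simp only [pvInW, pvH, pvRowSum, decide_eq_true_eq, PySem.List.pyGetD_natCast]

-- ===== VERDICT (by name: the statements are the Claim_ definitions above) =====
theorem solution_spec : Claim_unchanged_solution := by
  intro data col rb re _hdom hpre
  unfold Spec_solution
  intro hnd
  obtain ⟨hne, _hrows, hwin⟩ := hpre
  unfold D_solution at hnd
  rw [pv_B_eq]
  by_cases hempty : re ≤ rb - 1
  · -- empty window: A XORs nothing, B's filter keeps nothing
    have hfil : ((List.range data.length).filter
        (fun p => pvInW rb re (pvRank col data p))) = [] := by
      rw [List.filter_eq_nil_iff]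
      intro p _
      simp only [pvInW, decide_eq_true_eq]
      omega
    rw [hfil]
    unfold solution
    rw [PySem.List.pyRange_one_eq_nil hempty]
    rfl
  · have hb : 1 ≤ rb := by omega
    have he : re ≤ (data.length : Int) := by rcases hwin with h | ⟨_, h⟩ <;> omega
    rw [pv_A_mid data col rb re hb he]
    obtain ⟨σ, hperm, hsort, hpw⟩ := pv_stab col data
    have hσlen : σ.length = data.length := by simpa using hperm.length_eq
    rw [pv_pyRange_eq data.length (rb - 1) re (by omega) he, List.foldl_map]
    have hpred : (fun i : Nat => decide (rb - 1 ≤ (i : Int) ∧ (i : Int) < re)) =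
        (fun i : Nat => pvInW rb re i) := rfl
    rw [hpred]
    refine (PySem.List.foldl_congr_mem _ _
      (fun acc (i : Nat) => PySem.Int.bxor acc (pvH col data (σ.getD i 0))) 0 ?_).trans ?_
    · intro acc i hi
      obtain ⟨hir, hiw⟩ := List.mem_filter.mp hi
      have hin : i < data.length := List.mem_range.mp hir
      have hiσ : i < σ.length := by omega
      have hgd : σ.getD i 0 = σ[i] := List.getD_eq_getElem σ 0 hiσ
      congr 1
      rw [hsort, PySem.List.pyGetD_natCast,
          List.getD_eq_getElem _ _ (by simpa [hσlen] using hin), List.getElem_map, hgd,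
          pvH, pv_rank_getElem col data σ hperm hpw i hiσ, pvRowSum]
    · rw [← List.foldl_map (f := fun i : Nat => σ.getD i 0)
          (g := fun acc p => PySem.Int.bxor acc (pvH col data p))]
      haveI : RightCommutative (fun acc p => PySem.Int.bxor acc (pvH col data p)) :=
        ⟨fun b x y => pv_bxor_right_comm b (pvH col data x) (pvH col data y)⟩
      exact List.Perm.foldl_eq (pv_window_perm col rb re data σ hperm hpw) 0

theorem solution_changed : Claim_changed_solution := by
  unfold Claim_changed_solution
  decide
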